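-- pv_equiv track=rewrite | github.com/JSchmid6/HAFamilyLink | scripts/diagnose_entities.py | _get_sapisid
-- ===== SOURCE A (Python) =====
-- def _get_sapisid(cookies: list[dict]) -> str:
--     for c in cookies:
--         if c.get("name") == "SAPISID":
--             return c["value"]
--     for c in cookies:
--         if c.get("name") in ("__Secure-3PAPISID", "APISID"):
--             return c["value"]
--     raise ValueError("SAPISID cookie not found!")
-- ===== SOURCE B (Python) =====
-- def _get_sapisid(cookies: list[dict]) -> str:
--     fallback = None
--     for c in cookies:
--         name = c.get("name")
--         if name == "SAPISID":
--             return c["value"]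
--         if fallback is None and name in ("__Secure-3PAPISID", "APISID"):
--             fallback = c
--     if fallback is not None:
--         return fallback["value"]
--     raise ValueError("SAPISID cookie not found!")
-- ===== Notes on version B (the rewrite author's own statement) =====
-- stated objective: simpler
-- what changed: Fused A's two passes over the cookie list into a single loop that returns SAPISID's value immediately and remembers the first fallback cookie, reading its value only after the loop.
import Mathlib
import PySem

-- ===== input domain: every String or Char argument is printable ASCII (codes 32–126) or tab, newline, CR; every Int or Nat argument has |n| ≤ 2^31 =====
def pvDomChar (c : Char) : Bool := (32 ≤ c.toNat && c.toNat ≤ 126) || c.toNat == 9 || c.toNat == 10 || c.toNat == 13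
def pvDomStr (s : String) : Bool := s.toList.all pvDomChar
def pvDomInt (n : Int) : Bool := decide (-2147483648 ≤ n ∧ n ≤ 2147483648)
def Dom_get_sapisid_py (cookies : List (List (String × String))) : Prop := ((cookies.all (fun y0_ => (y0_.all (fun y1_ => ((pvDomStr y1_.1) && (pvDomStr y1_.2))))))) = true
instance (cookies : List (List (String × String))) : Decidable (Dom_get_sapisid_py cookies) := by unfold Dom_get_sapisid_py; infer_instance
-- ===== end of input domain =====

-- B fuses A's two passes into a single loop that remembers the first fallback cookie (simpler, one traversal).


-- ===== PORT A =====
-- dict lookup on the assoc-list encoding: first match (exact for Python dicts, which have unique keys)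
def dget (c : List (String × String)) (k : String) : Option String :=
  (c.find? (fun kv => kv.1 == k)).map (·.2)

-- second for-loop of A (fallback names); none = the raise / a KeyError on c["value"]
def pyA_loop2 : List (List (String × String)) → Option String
  | [] => none
  | c :: r =>
    if dget c "name" = some "__Secure-3PAPISID" ∨ dget c "name" = some "APISID" then
      dget c "value"
    else pyA_loop2 r

-- first for-loop of A; when exhausted, falls through to the second loop over the full list
def pyA_loop1 (cookies : List (List (String × String))) : List (List (String × String)) → Option String
  | [] => pyA_loop2 cookies
  | c :: r =>
    if dget c "name" = some "SAPISID" then dget c "value"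
    else pyA_loop1 cookies r

def get_sapisid_py (cookies : List (List (String × String))) : String :=
  (pyA_loop1 cookies cookies).getD ""

-- ===== PORT B =====
-- B's single loop: return SAPISID's value at once; otherwise record the first fallback cookie,
-- reading its "value" only after the loop (none = the raise / a KeyError)
def pyB_loop : List (List (String × String)) → Option (List (String × String)) → Option String
  | [], fb =>
    match fb with
    | some f => dget f "value"
    | none => none
  | c :: r, fb =>
    if dget c "name" = some "SAPISID" then dget c "value"
    else
      pyB_loop r
        (if fb = none ∧ (dget c "name" = some "__Secure-3PAPISID" ∨ dget c "name" = some "APISID")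
         then some c else fb)

def get_sapisid_py_alt (cookies : List (List (String × String))) : String :=
  (pyB_loop cookies none).getD ""

-- ===== PRECONDITION & SPEC =====
-- Pre_ excludes exactly the inputs on which A raises: no SAPISID/fallback-named cookie at all
-- (ValueError), or the selected cookie lacking a "value" key (KeyError).
def Pre_get_sapisid_py (cookies : List (List (String × String))) : Prop :=
  (((cookies.find? (fun c => decide (dget c "name" = some "SAPISID"))).orElse
      (fun _ => cookies.find? (fun c => decide (dget c "name" = some "__Secure-3PAPISID" ∨ dget c "name" = some "APISID")))).bind
    (fun c => dget c "value")).isSome = true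
instance (cookies : List (List (String × String))) : Decidable (Pre_get_sapisid_py cookies) := by unfold Pre_get_sapisid_py; infer_instance

def pvWitness_get_sapisid_py : (List (List (String × String))) := [[("name", "SAPISID"), ("value", "abc")]]

def Spec_get_sapisid_py (cookies : List (List (String × String))) (out : String) : Prop := out = get_sapisid_py_alt cookies
instance (cookies : List (List (String × String))) (out : String) : Decidable (Spec_get_sapisid_py cookies out) := by unfold Spec_get_sapisid_py; infer_instance

-- ===== CLAIM (what is proved, stated in full; the proofs are below) =====
def Claim_equal_get_sapisid_py : Prop := ∀ (cookies : List (List (String × String))), Dom_get_sapisid_py cookies → Pre_get_sapisid_py cookies → Spec_get_sapisid_py cookies (get_sapisid_py cookies)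

-- ===== LEMMAS AND PROOFS =====
theorem pyB_loop_eq (l : List (List (String × String))) :
    ∀ fb, pyB_loop l fb =
      match l.find? (fun c => decide (dget c "name" = some "SAPISID")) with
      | some c => dget c "value"
      | none =>
        match fb with
        | some f => dget f "value"
        | none => pyA_loop2 l := by
  induction l with
  | nil => intro fb; cases fb <;> simp [pyB_loop, pyA_loop2]
  | cons c r ih =>
    intro fb
    by_cases hs : dget c "name" = some "SAPISID"
    · simp [pyB_loop, List.find?, hs]
    · by_cases hf : dget c "name" = some "__Secure-3PAPISID" ∨ dget c "name" = some "APISID"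
      · cases fb with
        | none => simp [pyB_loop, List.find?, hs, hf, ih, pyA_loop2]
        | some f => simp [pyB_loop, List.find?, hs, hf, ih]
      · cases fb with
        | none => simp [pyB_loop, List.find?, hs, hf, ih, pyA_loop2]
        | some f => simp [pyB_loop, List.find?, hs, hf, ih]

theorem pyA_loop1_eq (full : List (List (String × String))) (l : List (List (String × String))) :
    pyA_loop1 full l =
      match l.find? (fun c => decide (dget c "name" = some "SAPISID")) with
      | some c => dget c "value"
      | none => pyA_loop2 full := by
  induction l with
  | nil => simp [pyA_loop1]
  | cons c r ih =>
    by_cases hs : dget c "name" = some "SAPISID"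
    · simp [pyA_loop1, List.find?, hs]
    · simp [pyA_loop1, List.find?, hs, ih]

-- ===== VERDICT (by name: the statement is the Claim_ definition above) =====
theorem get_sapisid_py_spec : Claim_equal_get_sapisid_py := by
  intro cookies _ _
  unfold Spec_get_sapisid_py get_sapisid_py get_sapisid_py_alt
  rw [pyA_loop1_eq, pyB_loop_eq]
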